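-- pv_equiv track=rewrite | github.com/AlexKuhnle/ShapeWorld | shapeworld/analyzers/derivtree.py | find_previous
-- ===== SOURCE A (Python) =====
-- def find_previous(string, start=None, end=None, whitespace=False):
--     if start is None or start < 0:
--         start = 0
--     if end is None or end < 0:
--         end = len(string)
--     for i in range(end-1, start-1, -1):
--         if (string[i] == ' ') is whitespace:
--             return i
--     return -1
-- ===== SOURCE B (Python) =====
-- def find_previous(string, start=None, end=None, whitespace=False):
--     if start is None or start < 0:
--         start = 0
--     if end is None or end < 0:
--         end = len(string)
--     result = -1
--     for i in range(start, end):
--         if (string[i] == ' ') is whitespace: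
--             result = i
--     return result
-- ===== Notes on version B (the rewrite author's own statement) =====
-- stated objective: alternative
-- what changed: Replaces the backward scan with early return by a forward scan over range(start, end) that keeps the last matching index in an accumulator and returns it after the loop.
import Mathlib
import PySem

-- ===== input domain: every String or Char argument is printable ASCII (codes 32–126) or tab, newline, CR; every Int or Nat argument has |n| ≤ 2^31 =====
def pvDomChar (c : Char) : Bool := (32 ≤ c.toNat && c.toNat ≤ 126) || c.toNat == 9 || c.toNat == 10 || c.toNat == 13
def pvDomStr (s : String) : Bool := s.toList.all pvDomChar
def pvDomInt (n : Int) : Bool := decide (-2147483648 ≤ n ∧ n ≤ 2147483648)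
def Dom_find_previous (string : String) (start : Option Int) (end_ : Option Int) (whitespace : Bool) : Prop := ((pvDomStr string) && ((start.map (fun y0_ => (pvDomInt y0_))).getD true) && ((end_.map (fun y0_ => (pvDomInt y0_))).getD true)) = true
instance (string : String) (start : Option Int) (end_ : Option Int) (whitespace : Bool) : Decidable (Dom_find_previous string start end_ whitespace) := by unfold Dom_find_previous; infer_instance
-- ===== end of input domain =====

-- B replaces A's backward scan with early return by a forward scan that records the last matching index (alternative decomposition, same cost).


-- ===== PORT A =====
-- backward scan: return the first index (from the high end) whose character matches, else -1
def fpA_loop (string : String) (whitespace : Bool) : List Int → Int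
  | [] => -1
  | i :: rest =>
      if ((PySem.Str.pyGet? string i == some ' ') == whitespace) then i
      else fpA_loop string whitespace rest

def find_previous (string : String) (start : Option Int) (end_ : Option Int) (whitespace : Bool) : Int :=
  let s : Int := match start with | none => 0 | some v => if v < 0 then 0 else v
  let e : Int := match end_ with | none => PySem.Str.len string | some v => if v < 0 then PySem.Str.len string else v
  fpA_loop string whitespace (PySem.List.pyRange (e - 1) (s - 1) (-1))

-- ===== PORT B =====
-- forward scan keeping the last matching index in an accumulator
def find_previous_alt (string : String) (start : Option Int) (end_ : Option Int) (whitespace : Bool) : Int :=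
  let s : Int := match start with | none => 0 | some v => if v < 0 then 0 else v
  let e : Int := match end_ with | none => PySem.Str.len string | some v => if v < 0 then PySem.Str.len string else v
  (PySem.List.pyRange s e 1).foldl
    (fun result i =>
      if ((PySem.Str.pyGet? string i == some ' ') == whitespace) then i else result)
    (-1)

-- ===== PRECONDITION & SPEC =====
-- Pre_ excludes exactly the inputs on which Python A raises IndexError: a non-empty
-- scan range whose clamped end exceeds len(string).
def Pre_find_previous (string : String) (start : Option Int) (end_ : Option Int) (whitespace : Bool) : Prop :=
  let s : Int := match start with | none => 0 | some v => if v < 0 then 0 else v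
  let e : Int := match end_ with | none => PySem.Str.len string | some v => if v < 0 then PySem.Str.len string else v
  e ≤ PySem.Str.len string ∨ s ≥ e
instance (string : String) (start : Option Int) (end_ : Option Int) (whitespace : Bool) : Decidable (Pre_find_previous string start end_ whitespace) := by unfold Pre_find_previous; infer_instance

def pvWitness_find_previous : String × Option Int × Option Int × Bool := ("a b c", some 1, none, true)

def Spec_find_previous (string : String) (start : Option Int) (end_ : Option Int) (whitespace : Bool) (out : Int) : Prop := out = find_previous_alt string start end_ whitespace
instance (string : String) (start : Option Int) (end_ : Option Int) (whitespace : Bool) (out : Int) : Decidable (Spec_find_previous string start end_ whitespace out) := by unfold Spec_find_previous; infer_instance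

-- ===== CLAIM (what is proved, stated in full; the proofs are below) =====
def Claim_equal_find_previous : Prop := ∀ (string : String) (start : Option Int) (end_ : Option Int) (whitespace : Bool), Dom_find_previous string start end_ whitespace → Pre_find_previous string start end_ whitespace → Spec_find_previous string start end_ whitespace (find_previous string start end_ whitespace)

-- ===== LEMMAS AND PROOFS =====

-- A's loop is 'first match or -1'
theorem fpA_loop_eq_find? (string : String) (whitespace : Bool) (l : List Int) :
    fpA_loop string whitespace l
      = (l.find? (fun i => (PySem.Str.pyGet? string i == some ' ') == whitespace)).getD (-1) := by
  induction l with
  | nil => rfl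
  | cons x xs ih =>
      simp only [fpA_loop, List.find?_cons]
      cases h : ((PySem.Str.pyGet? string x == some ' ') == whitespace) with
      | true => simp only [if_true, Option.getD_some]
      | false => simp only [if_false, Bool.false_eq_true]; exact ih

-- B's fold is 'first match in the reversed list, else the accumulator'
theorem foldl_last_match (c : Int → Bool) (l : List Int) (acc : Int) :
    l.foldl (fun result i => if c i then i else result) acc
      = (l.reverse.find? c).getD acc := by
  induction l generalizing acc with
  | nil => rfl
  | cons x xs ih =>
      simp only [List.foldl_cons, List.reverse_cons, List.find?_append]
      rw [ih]
      cases h : xs.reverse.find? c with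
      | some v => simp
      | none =>
          by_cases hc : c x = true
          · simp [List.find?, hc]
          · simp [List.find?, hc]

theorem find_previous_spec' (string : String) (start : Option Int) (end_ : Option Int)
    (whitespace : Bool) :
    find_previous string start end_ whitespace = find_previous_alt string start end_ whitespace := by
  unfold find_previous find_previous_alt
  rw [foldl_last_match, fpA_loop_eq_find?]
  congr 1
  congr 1
  rw [PySem.List.pyRange_neg_one_eq_reverse]
  congr 2 <;> omega

-- ===== VERDICT (by name: the statement is the Claim_ definition above) =====
theorem find_previous_spec : Claim_equal_find_previous := by
  intro string start end_ whitespace _ _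
  unfold Spec_find_previous
  exact find_previous_spec' string start end_ whitespace
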